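-- pv_equiv track=rewrite | github.com/arthusu/hacking_scripts | redis_analyzer.py | parse_bulk_string
-- ===== SOURCE A (Python) =====
-- def parse_bulk_string(response):
--     """Parse Redis bulk string response"""
--     if not response:
--         return None
--
--     lines = response.split('\n')
--     for i, line in enumerate(lines):
--         if line.startswith('$'):
--             if i + 1 < len(lines):
--                 return lines[i + 1].strip()
--     return None
-- ===== SOURCE B (Python) =====
-- def _scan(probe):
--     # probe starts with '\n', so every line start is right after a '\n'
--     i = probe.find('\n$')
--     if i == -1:
--         return None
--     j = probe.find('\n', i + 1)      # end of the '$' line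
--     if j == -1:
--         return None                  # the '$' line is the last line
--     k = probe.find('\n', j + 1)      # end of the following line
--     nxt = probe[j + 1:] if k == -1 else probe[j + 1:k]
--     return nxt.strip()
--
--
-- def parse_bulk_string(response):
--     """Parse Redis bulk string response"""
--     if not response:
--         return None
--     return _scan('\n' + response)
-- ===== Notes on version B (the rewrite author's own statement) =====
-- stated objective: alternative
-- what changed: Replaces splitting the response into a list of all lines and an enumerate loop with index bookkeeping by a single raw-string scan: one find of the marker '\n$' on '\n'+response locates the first '$' line, two more find calls delimit the following line, which is sliced out and stripped; no line list is ever built.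
import Mathlib
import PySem

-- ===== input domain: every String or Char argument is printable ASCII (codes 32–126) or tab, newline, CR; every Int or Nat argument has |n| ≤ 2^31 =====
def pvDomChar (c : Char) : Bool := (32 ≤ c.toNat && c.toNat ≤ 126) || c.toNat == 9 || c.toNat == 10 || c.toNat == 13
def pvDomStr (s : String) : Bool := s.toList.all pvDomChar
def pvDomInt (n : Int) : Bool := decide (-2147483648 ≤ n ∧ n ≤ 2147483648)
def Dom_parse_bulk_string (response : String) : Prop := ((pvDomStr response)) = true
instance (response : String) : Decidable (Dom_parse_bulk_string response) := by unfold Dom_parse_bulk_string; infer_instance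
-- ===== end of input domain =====

-- B replaces A's split-into-all-lines + enumerate loop by a raw-string scan with three find calls; alternative (same cost).

-- ===== PORT A =====
-- the for-loop over enumerate(lines): at each step `rest` is lines[i+1:], so
-- `i + 1 < len(lines)` is `rest ≠ []` and `lines[i+1]` is its head.
def pvScanLines : List (List Char) → Option String
  | [] => none
  | line :: rest =>
    if PySem.Chars.startswith line ['$'] then
      match rest with
      | nxt :: _ => some (String.ofList (PySem.Chars.strip nxt))
      | [] => none
    else pvScanLines rest

def parse_bulk_string (response : String) : Option String :=
  if response = "" then none
  else pvScanLines (PySem.Chars.splitOn response.toList ['\n'])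

-- ===== PORT B =====
-- Source B's _scan(probe): three raw-string find calls and one slice, no line list.
def pvScanRaw (probe : List Char) : Option String :=
  let i := PySem.Chars.find probe ['\n', '$']
  if i = -1 then none
  else
    let j := PySem.Chars.findFrom probe ['\n'] (i + 1)
    if j = -1 then none
    else
      let k := PySem.Chars.findFrom probe ['\n'] (j + 1)
      let nxt := if k = -1 then PySem.Chars.slice probe (some (j + 1)) none
                 else PySem.Chars.slice probe (some (j + 1)) (some k)
      some (String.ofList (PySem.Chars.strip nxt))

def parse_bulk_string_alt (response : String) : Option String :=
  if response = "" then none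
  else pvScanRaw ('\n' :: response.toList)

-- ===== PRECONDITION & SPEC =====
def Spec_parse_bulk_string (response : String) (out : Option String) : Prop := out = parse_bulk_string_alt response
instance (response : String) (out : Option String) : Decidable (Spec_parse_bulk_string response out) := by unfold Spec_parse_bulk_string; infer_instance

-- ===== CLAIM (what is proved, stated in full; the proofs are below) =====
def Claim_equal_parse_bulk_string : Prop := ∀ (response : String), Dom_parse_bulk_string response → Spec_parse_bulk_string response (parse_bulk_string response)

-- ===== LEMMAS AND PROOFS =====

-- structural description of response.split('\n')
def pvLines : List Char → List (List Char)
  | [] => [[]]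
  | c :: r =>
    if c = '\n' then [] :: pvLines r
    else
      match pvLines r with
      | p :: ps => (c :: p) :: ps
      | [] => [[c]]

-- '\n' + response, rebuilt from the line list: each line contributes the block '\n' ++ line
def pvBlocks (ls : List (List Char)) : List Char := (ls.map (fun l => '\n' :: l)).flatten

theorem pvLines_ne_nil (cs : List Char) : pvLines cs ≠ [] := by
  cases cs with
  | nil => simp [pvLines]
  | cons c r =>
    simp only [pvLines]
    split
    · simp
    · split <;> simp

theorem pvSplitOn_go_eq : ∀ (fuel : Nat) (l cur : List Char) (acc : List (List Char)),
    l.length < fuel →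
    PySem.Chars.splitOn.go ['\n'] fuel l cur acc =
      acc.reverse ++
        (match pvLines l with
         | p :: ps => (cur.reverse ++ p) :: ps
         | [] => [cur.reverse]) := by
  intro fuel
  induction fuel with
  | zero => intro l cur acc h; omega
  | succ f ih =>
    intro l cur acc h
    cases l with
    | nil => simp [PySem.Chars.splitOn.go, pvLines]
    | cons c rest =>
      by_cases hc : c = '\n'
      · subst hc
        rw [show PySem.Chars.splitOn.go ['\n'] (f+1) ('\n'::rest) cur acc
              = PySem.Chars.splitOn.go ['\n'] f rest [] (cur.reverse :: acc) by
            simp [PySem.Chars.splitOn.go, List.isPrefixOf]]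
        rw [ih rest [] (cur.reverse :: acc) (by simpa using h)]
        rcases hp : pvLines rest with _ | ⟨p, ps⟩
        · exact absurd hp (pvLines_ne_nil rest)
        · simp [pvLines, hp]
      · rw [show PySem.Chars.splitOn.go ['\n'] (f+1) (c::rest) cur acc
              = PySem.Chars.splitOn.go ['\n'] f rest (c :: cur) acc by
            simp [PySem.Chars.splitOn.go, List.isPrefixOf, Ne.symm hc]]
        rw [ih rest (c :: cur) acc (by simpa using h)]
        rcases hp : pvLines rest with _ | ⟨p, ps⟩
        · exact absurd hp (pvLines_ne_nil rest)
        · simp [pvLines, hp, hc]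

theorem pvSplitOn_eq (cs : List Char) : PySem.Chars.splitOn cs ['\n'] = pvLines cs := by
  rw [PySem.Chars.splitOn, pvSplitOn_go_eq (cs.length + 1) cs [] [] (by omega)]
  rcases hp : pvLines cs with _ | ⟨p, ps⟩
  · exact absurd hp (pvLines_ne_nil cs)
  · simp

theorem pvLines_free (cs : List Char) : ∀ l ∈ pvLines cs, '\n' ∉ l := by
  induction cs with
  | nil => simp [pvLines]
  | cons c r ih =>
    by_cases hc : c = '\n'
    · subst hc; simpa [pvLines] using ih
    · rcases hp : pvLines r with _ | ⟨p, ps⟩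
      · exact absurd hp (pvLines_ne_nil r)
      · intro l hl
        simp only [pvLines, if_neg hc, hp, List.mem_cons] at hl
        rcases hl with rfl | hl
        · intro hmem
          rcases List.mem_cons.mp hmem with h | h
          · exact hc h.symm
          · exact ih p (hp ▸ List.mem_cons_self ..) h
        · exact ih l (hp ▸ List.mem_cons_of_mem _ hl)

theorem pvBlocks_pvLines (cs : List Char) : pvBlocks (pvLines cs) = '\n' :: cs := by
  induction cs with
  | nil => simp [pvLines, pvBlocks]
  | cons c r ih =>
    by_cases hc : c = '\n'
    · subst hc; simp [pvLines, pvBlocks] at ih ⊢; simpa using ih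
    · rcases hp : pvLines r with _ | ⟨p, ps⟩
      · exact absurd hp (pvLines_ne_nil r)
      · rw [hp] at ih
        simp only [pvLines, if_neg hc, hp, pvBlocks, List.map_cons, List.flatten_cons] at ih ⊢
        simp at ih ⊢
        exact ih

theorem pv_find_eq_of_first (s sub : List Char) (m : Nat)
    (h1 : sub <+: s.drop m) (h2 : ∀ t, t < m → ¬ sub <+: s.drop t) :
    PySem.Chars.find s sub = (m : Int) := by
  have hin : PySem.Chars.isIn sub s = true :=
    (PySem.Chars.exists_prefix_drop_iff_isIn sub s).mp ⟨m, h1⟩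
  have hnn : 0 ≤ PySem.Chars.find s sub :=
    (PySem.Chars.find_nonneg_iff s sub).mpr ((PySem.Chars.isIn_iff_infix sub s).mp hin)
  obtain ⟨hpre, hmin⟩ := PySem.Chars.find_spec hnn
  have h3 : (PySem.Chars.find s sub).toNat ≤ m := by
    by_contra hlt
    push_neg at hlt
    exact hmin m hlt h1
  have h4 : m ≤ (PySem.Chars.find s sub).toNat := by
    by_contra hlt
    push_neg at hlt
    exact h2 _ hlt hpre
  omega

theorem pv_find_shift (s sub : List Char) (m : Nat) (hm : m ≤ s.length)
    (h2 : ∀ t, t < m → ¬ sub <+: s.drop t) :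
    PySem.Chars.find s sub =
      if PySem.Chars.find (s.drop m) sub = -1 then -1
      else (m : Int) + PySem.Chars.find (s.drop m) sub := by
  split_ifs with h
  · rw [PySem.Chars.find_eq_neg_one_iff] at h ⊢
    intro hinf
    obtain ⟨j, hj⟩ := (PySem.Chars.exists_prefix_drop_iff_isIn sub s).mpr
      ((PySem.Chars.isIn_iff_infix sub s).mpr hinf)
    rcases Nat.lt_or_ge j m with hjm | hjm
    · exact h2 j hjm hj
    · apply h
      have : sub <+: (s.drop m).drop (j - m) := by
        rw [List.drop_drop]
        have : m + (j - m) = j := by omega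
        rw [this]
        exact hj
      exact ((PySem.Chars.isIn_iff_infix sub _).mp
        ((PySem.Chars.exists_prefix_drop_iff_isIn sub _).mp ⟨j - m, this⟩))
  · have hnn : 0 ≤ PySem.Chars.find (s.drop m) sub := by
      have := PySem.Chars.neg_one_le_find (s.drop m) sub
      omega
    obtain ⟨hp, hmin⟩ := PySem.Chars.find_spec hnn
    set f := (PySem.Chars.find (s.drop m) sub).toNat with hf
    have hcast : PySem.Chars.find (s.drop m) sub = (f : Int) := by omega
    rw [hcast]
    have : ((m : Int) + (f : Int)) = ((m + f : Nat) : Int) := by push_cast; ring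
    rw [this]
    apply pv_find_eq_of_first
    · rw [← List.drop_drop]
      exact hp
    · intro t ht
      rcases Nat.lt_or_ge t m with htm | htm
      · exact h2 t htm
      · have : s.drop t = (s.drop m).drop (t - m) := by
          rw [List.drop_drop]
          congr 1
          omega
        rw [this]
        exact hmin (t - m) (by omega)

theorem pv_findFrom_shift (b s' sub : List Char) (t : Nat) (ht : t ≤ s'.length) :
    PySem.Chars.findFrom (b ++ s') sub ((b.length + t : Nat) : Int) =
      if PySem.Chars.findFrom s' sub (t : Nat) = -1 then -1
      else (b.length : Int) + PySem.Chars.findFrom s' sub (t : Nat) := by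
  rw [PySem.Chars.findFrom_natCast (b ++ s') sub (b.length + t) (by simp; omega),
      PySem.Chars.findFrom_natCast s' sub t ht,
      List.drop_length_add_append]
  have hge := PySem.Chars.neg_one_le_find (List.drop t s') sub
  split_ifs <;> push_cast <;> omega

theorem pv_find_no_nl (l : List Char) (hf : '\n' ∉ l) : PySem.Chars.find l ['\n'] = -1 := by
  rw [PySem.Chars.find_eq_neg_one_iff]
  rw [List.singleton_infix_iff]
  exact hf

theorem pv_find_nl (l w : List Char) (hf : '\n' ∉ l) :
    PySem.Chars.find (l ++ '\n' :: w) ['\n'] = (l.length : Int) := by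
  apply pv_find_eq_of_first
  · rw [show l.length = l.length + 0 by omega, List.drop_length_add_append]
    simp
  · intro t ht
    rw [List.drop_append_of_le_length (by omega)]
    rw [List.drop_eq_getElem_cons (by omega)]
    rw [List.cons_append, List.cons_prefix_iff]
    rintro ⟨l', hl', -⟩
    rw [List.cons.injEq] at hl'
    exact hf (hl'.1 ▸ List.getElem_mem _)

theorem pv_mid_no_nl (l w : List Char) (hf : '\n' ∉ l) (t : Nat) (h1 : 1 ≤ t)
    (h2 : t ≤ l.length) (sub' : List Char) :
    ¬ ('\n' :: sub') <+: (('\n' :: l) ++ w).drop t := by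
  have ht' : t = (t - 1) + 1 := by omega
  rw [List.cons_append, ht', List.drop_succ_cons,
      List.drop_append_of_le_length (show t - 1 ≤ l.length by omega),
      List.drop_eq_getElem_cons (show t - 1 < l.length by omega),
      List.cons_append, List.cons_prefix_iff]
  rintro ⟨l', hl', -⟩
  rw [List.cons.injEq] at hl'
  exact hf (hl'.1 ▸ List.getElem_mem _)

-- evaluation of the B scan, no marker case
theorem pvScanRaw_eval_nofind (probe : List Char)
    (hfind : PySem.Chars.find probe ['\n', '$'] = -1) : pvScanRaw probe = none := by
  simp [pvScanRaw, hfind]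

-- marker found but on the last line
theorem pvScanRaw_eval_lastline (probe : List Char) (m : Nat)
    (hfind : PySem.Chars.find probe ['\n', '$'] = (m : Int))
    (hj : PySem.Chars.findFrom probe ['\n'] ((m + 1 : Nat) : Int) = -1) :
    pvScanRaw probe = none := by
  simp only [pvScanRaw]
  rw [hfind]
  have h1 : ¬ ((m : Int) = -1) := by omega
  rw [if_neg h1]
  have h2 : ((m : Int) + 1) = ((m + 1 : Nat) : Int) := by push_cast; ring
  rw [h2, hj, if_pos rfl]

-- marker found, following line exists
theorem pvScanRaw_eval (probe : List Char) (m n : Nat)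
    (hfind : PySem.Chars.find probe ['\n', '$'] = (m : Int))
    (hj : PySem.Chars.findFrom probe ['\n'] ((m + 1 : Nat) : Int) = (n : Int)) :
    pvScanRaw probe =
      some (String.ofList (PySem.Chars.strip
        (if PySem.Chars.findFrom probe ['\n'] ((n + 1 : Nat) : Int) = -1
         then PySem.Chars.slice probe (some ((n + 1 : Nat) : Int)) none
         else PySem.Chars.slice probe (some ((n + 1 : Nat) : Int))
                (some (PySem.Chars.findFrom probe ['\n'] ((n + 1 : Nat) : Int)))))) := by
  simp only [pvScanRaw]
  rw [hfind]
  have h1 : ¬ ((m : Int) = -1) := by omega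
  rw [if_neg h1]
  have h2 : ((m : Int) + 1) = ((m + 1 : Nat) : Int) := by push_cast; ring
  rw [h2, hj]
  have h3 : ¬ ((n : Int) = -1) := by omega
  rw [if_neg h3]
  have h4 : ((n : Int) + 1) = ((n + 1 : Nat) : Int) := by push_cast; ring
  rw [h4]

set_option maxHeartbeats 2000000 in
theorem pvScanRaw_shift (l w : List Char) (hf : '\n' ∉ l)
    (hs : ¬ PySem.Chars.startswith l ['$'] = true) (hw : w = [] ∨ w.head? = some '\n') :
    pvScanRaw (('\n' :: l) ++ w) = pvScanRaw w := by
  have hsp : ¬ ['$'] <+: l := fun h => hs ((PySem.Chars.startswith_iff l ['$']).mpr h)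
  have hnone : ∀ t, t < l.length + 1 → ¬ ['\n', '$'] <+: (('\n' :: l) ++ w).drop t := by
    intro t ht
    rcases Nat.eq_zero_or_pos t with rfl | htpos
    · rw [List.drop_zero, List.cons_append, List.cons_prefix_iff]
      rintro ⟨l2, hl2, hp⟩
      rw [List.cons.injEq] at hl2
      have hdollar : ['$'] <+: l ++ w := hl2.2 ▸ hp
      cases l with
      | nil =>
        rcases hw with rfl | hw
        · simp at hdollar
        · cases w with
          | nil => simp at hdollar
          | cons c w' =>
            simp at hw
            rw [List.nil_append, List.cons_prefix_iff] at hdollar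
            obtain ⟨l3, hl3, -⟩ := hdollar
            rw [List.cons.injEq] at hl3
            exact absurd (hw ▸ hl3.1.symm) (by decide)
      | cons c l1 =>
        rw [List.cons_append, List.cons_prefix_iff] at hdollar
        obtain ⟨l3, hl3, -⟩ := hdollar
        rw [List.cons.injEq] at hl3
        exact hsp (List.cons_prefix_iff.mpr ⟨l1, by rw [hl3.1], List.nil_prefix⟩)
    · exact pv_mid_no_nl l w hf t htpos (by omega) ['$']
  have hlen : (('\n' :: l) ++ w).length = (l.length + 1) + w.length := by simp; omega
  have hdrop : (('\n' :: l) ++ w).drop (l.length + 1) = w := by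
    have : List.drop ('\n' :: l).length (('\n' :: l) ++ w) = w := List.drop_left
    simpa using this
  have hi : PySem.Chars.find (('\n' :: l) ++ w) ['\n', '$'] =
      if PySem.Chars.find w ['\n', '$'] = -1 then -1
      else ((l.length + 1 : Nat) : Int) + PySem.Chars.find w ['\n', '$'] := by
    have := pv_find_shift (('\n' :: l) ++ w) ['\n', '$'] (l.length + 1) (by rw [hlen]; omega) hnone
    rw [hdrop] at this
    exact this
  by_cases hfw : PySem.Chars.find w ['\n', '$'] = -1
  · have e1 := pvScanRaw_eval_nofind w hfw
    have e2 := pvScanRaw_eval_nofind (('\n' :: l) ++ w) (by rw [hi, if_pos hfw])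
    rw [e1, e2]
  · have hnn : 0 ≤ PySem.Chars.find w ['\n', '$'] := by
      have := PySem.Chars.neg_one_le_find w ['\n', '$']
      omega
    set m' := (PySem.Chars.find w ['\n', '$']).toNat with hm'def
    have hm' : PySem.Chars.find w ['\n', '$'] = (m' : Int) := by omega
    obtain ⟨hp2, -⟩ := PySem.Chars.find_spec hnn
    have hm'len : m' + 2 ≤ w.length := by
      have := List.IsPrefix.length_le hp2
      simp at this
      omega
    have hiv : PySem.Chars.find (('\n' :: l) ++ w) ['\n', '$']
        = ((l.length + 1 + m' : Nat) : Int) := by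
      rw [hi, if_neg hfw, hm']
      push_cast
      ring
    have hshift1' := pv_findFrom_shift ('\n' :: l) w ['\n'] (m' + 1) (by omega)
    have hblen : ('\n' :: l).length = l.length + 1 := by simp
    have hshift1 : PySem.Chars.findFrom (('\n' :: l) ++ w) ['\n'] ((l.length + 1 + m' + 1 : Nat) : Int) =
        if PySem.Chars.findFrom w ['\n'] ((m' + 1 : Nat) : Int) = -1 then -1
        else ((l.length + 1 : Nat) : Int) + PySem.Chars.findFrom w ['\n'] ((m' + 1 : Nat) : Int) := by
      rw [show (l.length + 1 + m' + 1) = ('\n' :: l).length + (m' + 1) by rw [hblen]; omega]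
      rw [hshift1', hblen]
    by_cases hjw : PySem.Chars.findFrom w ['\n'] ((m' + 1 : Nat) : Int) = -1
    · have e1 := pvScanRaw_eval_lastline w m' hm' hjw
      have e2 := pvScanRaw_eval_lastline (('\n' :: l) ++ w) (l.length + 1 + m') hiv
        (by rw [hshift1, if_pos hjw])
      rw [e1, e2]
    · obtain ⟨hj1, hj2, -⟩ := PySem.Chars.findFrom_natCast_spec w ['\n'] (m' + 1) (by omega) hjw
      set n' := (PySem.Chars.findFrom w ['\n'] ((m' + 1 : Nat) : Int)).toNat with hn'def
      have hjge : (0:Int) ≤ PySem.Chars.findFrom w ['\n'] ((m' + 1 : Nat) : Int) := by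
        have : ((m' + 1 : Nat) : Int) ≤ PySem.Chars.findFrom w ['\n'] ((m' + 1 : Nat) : Int) := hj1
        omega
      have hn' : PySem.Chars.findFrom w ['\n'] ((m' + 1 : Nat) : Int) = (n' : Int) := by omega
      have hn'lt : n' < w.length := by
        have := List.IsPrefix.length_le hj2
        simp at this
        omega
      have hjLv : PySem.Chars.findFrom (('\n' :: l) ++ w) ['\n'] ((l.length + 1 + m' + 1 : Nat) : Int)
          = ((l.length + 1 + n' : Nat) : Int) := by
        rw [hshift1, if_neg hjw, hn']
        push_cast
        ring
      have e1 := pvScanRaw_eval w m' n' hm' hn'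
      have e2 := pvScanRaw_eval (('\n' :: l) ++ w) (l.length + 1 + m') (l.length + 1 + n') hiv hjLv
      rw [e1, e2]
      -- now compare the two following-line slices
      have hshift2' := pv_findFrom_shift ('\n' :: l) w ['\n'] (n' + 1) (by omega)
      have hshift2 : PySem.Chars.findFrom (('\n' :: l) ++ w) ['\n'] ((l.length + 1 + n' + 1 : Nat) : Int) =
          if PySem.Chars.findFrom w ['\n'] ((n' + 1 : Nat) : Int) = -1 then -1
          else ((l.length + 1 : Nat) : Int) + PySem.Chars.findFrom w ['\n'] ((n' + 1 : Nat) : Int) := by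
        rw [show (l.length + 1 + n' + 1) = ('\n' :: l).length + (n' + 1) by rw [hblen]; omega]
        rw [hshift2', hblen]
      by_cases hkw : PySem.Chars.findFrom w ['\n'] ((n' + 1 : Nat) : Int) = -1
      · -- following line runs to the end in both strings
        rw [hshift2, hkw]
        simp only [if_pos rfl]
        have hsl : PySem.Chars.slice (('\n' :: l) ++ w) (some ((l.length + 1 + n' + 1 : Nat) : Int)) none
            = PySem.Chars.slice w (some ((n' + 1 : Nat) : Int)) none := by
          simp only [PySem.Chars.slice_eq_listSlice, PySem.List.slice_from_natCast]
          rw [show (l.length + 1 + n' + 1) = ('\n' :: l).length + (n' + 1) by rw [hblen]; omega,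
            List.drop_length_add_append]
        rw [hsl]
        simp
      · have hk1 := (PySem.Chars.findFrom_natCast_spec w ['\n'] (n' + 1) (by omega) hkw).1
        set p' := (PySem.Chars.findFrom w ['\n'] ((n' + 1 : Nat) : Int)).toNat with hp'def
        have hp' : PySem.Chars.findFrom w ['\n'] ((n' + 1 : Nat) : Int) = (p' : Int) := by omega
        have hp'ge : n' + 1 ≤ p' := by omega
        rw [hshift2, hp']
        have hc1 : ¬ ((p' : Nat) : Int) = -1 := by omega
        rw [if_neg hc1]
        have hcast : ((l.length + 1 : Nat) : Int) + ((p' : Nat) : Int) = ((l.length + 1 + p' : Nat) : Int) := by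
          push_cast
          ring
        rw [hcast]
        have hc2 : ¬ ((l.length + 1 + p' : Nat) : Int) = -1 := by omega
        rw [if_neg hc2]
        have hsl : PySem.Chars.slice (('\n' :: l) ++ w) (some ((l.length + 1 + n' + 1 : Nat) : Int)) (some ((l.length + 1 + p' : Nat) : Int))
            = PySem.Chars.slice w (some ((n' + 1 : Nat) : Int)) (some ((p' : Nat) : Int)) := by
          simp only [PySem.Chars.slice_eq_listSlice]
          have e1 : ((l.length + 1 + p' : Nat) : Int)
              = ((l.length + 1 + n' + 1 : Nat) : Int) + ((p' - (n' + 1) : Nat) : Int) := by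
            push_cast
            omega
          have e2 : ((p' : Nat) : Int) = ((n' + 1 : Nat) : Int) + ((p' - (n' + 1) : Nat) : Int) := by
            push_cast
            omega
          rw [e1, e2, PySem.List.slice_natCast_add, PySem.List.slice_natCast_add,
            show (l.length + 1 + n' + 1) = ('\n' :: l).length + (n' + 1) by rw [hblen]; omega,
            List.drop_length_add_append]
        rw [hsl]
        simp

theorem pvBlocks_cons (a : List Char) (ls : List (List Char)) :
    pvBlocks (a :: ls) = ('\n' :: a) ++ pvBlocks ls := by
  simp [pvBlocks]

theorem pv_main (lines : List (List Char)) (hfree : ∀ l ∈ lines, '\n' ∉ l) :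
    pvScanRaw (pvBlocks lines) = pvScanLines lines := by
  induction lines with
  | nil =>
    rw [pvScanRaw_eval_nofind]
    · rfl
    · decide
  | cons l0 rest ih =>
    rw [pvBlocks_cons]
    by_cases hs : PySem.Chars.startswith l0 ['$'] = true
    · -- l0 is the first '$' line
      obtain ⟨l0t, hl0, -⟩ := List.cons_prefix_iff.mp ((PySem.Chars.startswith_iff l0 ['$']).mp hs)
      have hfind : PySem.Chars.find (('\n' :: l0) ++ pvBlocks rest) ['\n', '$'] = ((0 : Nat) : Int) := by
        apply pv_find_eq_of_first
        · rw [List.drop_zero, List.cons_append, hl0]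
          exact List.cons_prefix_iff.mpr ⟨_, rfl, List.cons_prefix_iff.mpr ⟨_, rfl, List.nil_prefix⟩⟩
        · omega
      have hdrop1 : (('\n' :: l0) ++ pvBlocks rest).drop 1 = l0 ++ pvBlocks rest := rfl
      cases rest with
      | nil =>
        rw [pvScanRaw_eval_lastline _ 0 hfind]
        · simp [pvScanLines, hs]
        · rw [PySem.Chars.findFrom_natCast _ _ (0 + 1) (by simp), hdrop1]
          rw [show pvBlocks [] = [] from rfl, List.append_nil,
            pv_find_no_nl l0 (hfree l0 (by simp)), if_pos rfl]
      | cons l1 rest2 =>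
        have hw1 : pvBlocks (l1 :: rest2) = '\n' :: (l1 ++ pvBlocks rest2) := by
          rw [pvBlocks_cons]; rfl
        have hfindnl : PySem.Chars.find (l0 ++ pvBlocks (l1 :: rest2)) ['\n'] = (l0.length : Int) := by
          rw [hw1]
          exact pv_find_nl l0 _ (hfree l0 (by simp))
        have hj : PySem.Chars.findFrom (('\n' :: l0) ++ pvBlocks (l1 :: rest2)) ['\n'] ((0 + 1 : Nat) : Int)
            = ((l0.length + 1 : Nat) : Int) := by
          rw [PySem.Chars.findFrom_natCast _ _ (0 + 1) (by simp), hdrop1, hfindnl,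
            if_neg (by omega)]
          push_cast
          ring
        rw [pvScanRaw_eval _ 0 (l0.length + 1) hfind hj]
        have hdrop2 : (('\n' :: l0) ++ pvBlocks (l1 :: rest2)).drop (l0.length + 1 + 1)
            = l1 ++ pvBlocks rest2 := by
          rw [show l0.length + 1 + 1 = ('\n' :: l0).length + 1 by simp,
            List.drop_length_add_append, hw1]
          rfl
        have hlen2 : l0.length + 1 + 1 ≤ (('\n' :: l0) ++ pvBlocks (l1 :: rest2)).length := by
          simp [hw1]
        cases rest2 with
        | nil =>
          have hk : PySem.Chars.findFrom (('\n' :: l0) ++ pvBlocks [l1]) ['\n'] ((l0.length + 1 + 1 : Nat) : Int) = -1 := by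
            rw [PySem.Chars.findFrom_natCast _ _ (l0.length + 1 + 1) hlen2, hdrop2,
              show pvBlocks [] = [] from rfl, List.append_nil,
              pv_find_no_nl l1 (hfree l1 (by simp)), if_pos rfl]
          rw [if_pos hk]
          have hsl : PySem.Chars.slice (('\n' :: l0) ++ pvBlocks [l1]) (some ((l0.length + 1 + 1 : Nat) : Int)) none = l1 := by
            simp only [PySem.Chars.slice_eq_listSlice, PySem.List.slice_from_natCast]
            rw [hdrop2, show pvBlocks [] = [] from rfl, List.append_nil]
          rw [hsl]
          simp [pvScanLines, hs]
        | cons l2 rest3 =>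
          have hw2 : pvBlocks (l2 :: rest3) = '\n' :: (l2 ++ pvBlocks rest3) := by
            rw [pvBlocks_cons]; rfl
          have hk : PySem.Chars.findFrom (('\n' :: l0) ++ pvBlocks (l1 :: l2 :: rest3)) ['\n'] ((l0.length + 1 + 1 : Nat) : Int)
              = ((l0.length + 1 + 1 : Nat) : Int) + (l1.length : Int) := by
            rw [PySem.Chars.findFrom_natCast _ _ (l0.length + 1 + 1) hlen2, hdrop2]
            rw [hw2, pv_find_nl l1 _ (hfree l1 (by simp)), if_neg (by omega)]
          rw [if_neg (by rw [hk]; omega), hk]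
          have hcast : ((l0.length + 1 + 1 : Nat) : Int) + (l1.length : Int)
              = ((l0.length + 1 + 1 : Nat) : Int) + ((l1.length : Nat) : Int) := by push_cast; ring
          have hsl : PySem.Chars.slice (('\n' :: l0) ++ pvBlocks (l1 :: l2 :: rest3))
              (some ((l0.length + 1 + 1 : Nat) : Int))
              (some (((l0.length + 1 + 1 : Nat) : Int) + (l1.length : Int))) = l1 := by
            simp only [PySem.Chars.slice_eq_listSlice]
            rw [hcast, PySem.List.slice_natCast_add, hdrop2, hw2]
            rw [show l1 ++ '\n' :: (l2 ++ pvBlocks rest3) = l1 ++ ('\n' :: (l2 ++ pvBlocks rest3)) from rfl]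
            exact List.take_left
          rw [hsl]
          simp [pvScanLines, hs]
    · -- l0 is not a '$' line: drop its block and recurse
      rw [pvScanRaw_shift l0 (pvBlocks rest) (hfree l0 (by simp)) hs]
      · rw [ih (fun l hl => hfree l (by simp [hl]))]
        simp [pvScanLines, hs]
      · cases rest with
        | nil => exact Or.inl rfl
        | cons a ls => exact Or.inr (by rw [pvBlocks_cons]; rfl)

-- ===== VERDICT (by name: the statement is the Claim_ definition above) =====
theorem parse_bulk_string_spec : Claim_equal_parse_bulk_string := by
  intro response _
  unfold Spec_parse_bulk_string parse_bulk_string parse_bulk_string_alt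
  split
  · rfl
  · rw [pvSplitOn_eq, ← pv_main (pvLines response.toList) (pvLines_free _),
        pvBlocks_pvLines]
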